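-- pv_equiv track=rewrite | github.com/alizhantulep/Web_dev_2nd_attestation | task1/codingBat/warmup-1/8front.py | front_back
-- ===== SOURCE A (Python) =====
-- def front_back(str):
--     if(len(str)==1 or len(str)==0):
--         return str
--     new_str =""
--     new_str=str[len(str)-1]
--     for i in range (1,len(str)-1):
--         new_str = new_str + str[i]
--
--     new_str = new_str + str[0]
--     return new_str
-- ===== SOURCE B (Python) =====
-- def front_back(str):
--     if len(str) == 1 or len(str) == 0:
--         return str
--     return str[-1] + str[1:-1] + str[0]
-- ===== Notes on version B (the rewrite author's own statement) =====
-- stated objective: simpler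
-- what changed: Replaces the per-character accumulating loop with a single closed-form slice composition str[-1] + str[1:-1] + str[0].
import Mathlib
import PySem

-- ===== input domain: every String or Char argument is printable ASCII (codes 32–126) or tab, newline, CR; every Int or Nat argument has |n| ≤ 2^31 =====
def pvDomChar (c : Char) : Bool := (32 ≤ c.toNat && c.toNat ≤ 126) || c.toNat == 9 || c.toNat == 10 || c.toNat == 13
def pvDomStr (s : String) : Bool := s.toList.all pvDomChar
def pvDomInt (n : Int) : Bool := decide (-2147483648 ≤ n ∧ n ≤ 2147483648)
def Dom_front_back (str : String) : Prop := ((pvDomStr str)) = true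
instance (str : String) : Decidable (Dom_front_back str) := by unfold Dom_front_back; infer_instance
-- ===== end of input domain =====

-- B replaces A's per-character accumulating loop by one closed-form slice composition str[-1] + str[1:-1] + str[0] (simpler).

-- ===== PORT A =====
-- character-by-character accumulation: new_str = str[len-1], then appends str[i] for i in range(1, len-1), then str[0]
def front_back (str : String) : String :=
  if PySem.Str.len str = 1 ∨ PySem.Str.len str = 0 then str
  else
    let cs := str.toList
    let new_str : List Char := [PySem.List.pyGetD cs (PySem.Str.len str - 1) ' ']
    let new_str := (PySem.List.pyRange 1 (PySem.Str.len str - 1) 1).foldl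
      (fun acc i => acc ++ [PySem.List.pyGetD cs i ' ']) new_str
    let new_str := new_str ++ [PySem.List.pyGetD cs 0 ' ']
    String.ofList new_str

-- ===== PORT B =====
-- str[-1] + str[1:-1] + str[0] in one step
def front_back_alt (str : String) : String :=
  if PySem.Str.len str = 1 ∨ PySem.Str.len str = 0 then str
  else
    let cs := str.toList
    String.ofList ([PySem.List.pyGetD cs (-1) ' ']
      ++ PySem.List.slice cs (some 1) (some (-1))
      ++ [PySem.List.pyGetD cs 0 ' '])

-- ===== PRECONDITION & SPEC =====
def Spec_front_back (str : String) (out : String) : Prop := out = front_back_alt str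
instance (str : String) (out : String) : Decidable (Spec_front_back str out) := by unfold Spec_front_back; infer_instance

-- ===== CLAIM (what is proved, stated in full; the proofs are below) =====
def Claim_equal_front_back : Prop := ∀ (str : String), Dom_front_back str → Spec_front_back str (front_back str)

-- ===== LEMMAS AND PROOFS =====

-- str[1:-1] is the tail without its last element
theorem slice_one_neg_one (cs : List Char) :
    PySem.List.slice cs (some 1) (some (-1)) = cs.tail.dropLast := by
  rcases cs with _ | ⟨x, ys⟩
  · simp [PySem.List.slice, PySem.List.clampIdx]
  · simp [PySem.List.slice, PySem.List.clampIdx, List.dropLast_eq_take]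
    rw [if_neg (by omega)]
    omega

-- the indices A's loop visits read off exactly the middle characters
theorem map_range_tail_dropLast (cs : List Char) (d : Char) (h : 2 ≤ cs.length) :
    (PySem.List.pyRange 1 ((cs.length : Int) - 1) 1).map (fun i => PySem.List.pyGetD cs i d)
      = cs.tail.dropLast := by
  rw [PySem.List.pyRange_one]
  apply List.ext_getElem
  · simp
  · intro k h1 h2
    simp only [List.length_map, List.length_range] at h1
    have hk : k + 1 < cs.length := by omega
    simp only [List.getElem_map, List.getElem_range]
    rw [List.getElem_dropLast, List.getElem_tail]
    have : (1 : Int) + k = ((1 + k : Nat) : Int) := by push_cast; ring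
    rw [this, PySem.List.pyGetD_natCast]
    simp [List.getD_eq_getElem?_getD, List.getElem?_eq_getElem hk, Nat.add_comm]

-- str[len-1] is str[-1]
theorem pyGetD_len_sub_one (cs : List Char) (d : Char) (h : 1 ≤ cs.length) :
    PySem.List.pyGetD cs ((cs.length : Int) - 1) d = PySem.List.pyGetD cs (-1) d := by
  have hne : cs ≠ [] := by intro hc; simp [hc] at h
  rw [PySem.List.pyGetD_neg_one cs d hne]
  have : ((cs.length : Int) - 1) = ((cs.length - 1 : Nat) : Int) := by omega
  rw [this, PySem.List.pyGetD_natCast]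
  rw [List.getLast_eq_getElem]
  simp [List.getD_eq_getElem?_getD, List.getElem?_eq_getElem (by omega : cs.length - 1 < cs.length)]

-- ===== VERDICT (by name: the statement is the Claim_ definition above) =====
theorem front_back_spec : Claim_equal_front_back := by
  intro str _
  unfold Spec_front_back front_back front_back_alt
  split
  · rfl
  · rename_i hlen
    have h2 : 2 ≤ str.toList.length := by
      rw [PySem.Str.len_eq] at hlen; push Not at hlen; omega
    simp only [PySem.Str.len_eq]
    rw [PySem.List.foldl_append_singleton_eq_map, slice_one_neg_one,
      map_range_tail_dropLast _ _ h2, pyGetD_len_sub_one _ _ (by omega)]
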